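-- pv_equiv track=rewrite | github.com/jasoneveleth/euler | prob025.py | phi_pow
-- ===== SOURCE A (Python) =====
-- def mult(p1, p2):
--     # takes in two phi structs: (a + b*sqrt(5)) / c
--     a,b,c = p1
--     d,e,f = p2
--     return (a*d + 5*b*e, a*e + b*d, c*f)
--
-- def phi_pow(base, n):
--     if n == 0:
--         val = (1, 0, 1)
--     else:
--         val = phi_pow(mult(base, base), n//2)
--         if n & 1:
--             val = mult(base, val)
--     return val
-- ===== SOURCE B (Python) =====
-- def mult(p1, p2):
--     # takes in two phi structs: (a + b*sqrt(5)) / c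
--     a,b,c = p1
--     d,e,f = p2
--     return (a*d + 5*b*e, a*e + b*d, c*f)
--
-- def phi_pow(base, n):
--     # left-to-right (MSB-first) square-and-multiply over n's binary digits
--     result = (1, 0, 1)
--     for ch in format(n, 'b'):
--         result = mult(result, result)
--         if ch == '1':
--             result = mult(result, base)
--     return result
-- ===== Notes on version B (the rewrite author's own statement) =====
-- stated objective: alternative
-- what changed: Replaces A's LSB-side recursion on n//2 with a left-to-right (MSB-first) square-and-multiply loop over the binary digit string of n, maintaining a single accumulator.
import Mathlib
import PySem

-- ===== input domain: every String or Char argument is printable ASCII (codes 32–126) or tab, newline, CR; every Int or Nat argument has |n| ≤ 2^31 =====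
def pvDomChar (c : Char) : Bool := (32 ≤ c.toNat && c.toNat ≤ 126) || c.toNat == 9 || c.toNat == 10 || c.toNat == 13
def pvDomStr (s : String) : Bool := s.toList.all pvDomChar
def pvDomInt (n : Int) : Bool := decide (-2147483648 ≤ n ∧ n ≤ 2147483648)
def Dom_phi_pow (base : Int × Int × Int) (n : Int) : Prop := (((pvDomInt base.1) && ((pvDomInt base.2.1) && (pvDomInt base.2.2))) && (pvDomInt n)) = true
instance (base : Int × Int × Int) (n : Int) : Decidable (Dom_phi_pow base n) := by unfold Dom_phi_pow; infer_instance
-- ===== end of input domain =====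

-- B replaces A's LSB-side recursion on n//2 with an MSB-first square-and-multiply fold over n's binary digits; equivalence proved for n ≥ 0 (A recurses forever on n < 0).


-- ===== PORT A =====
def mult (p1 p2 : Int × Int × Int) : Int × Int × Int :=
  let (a, b, c) := p1
  let (d, e, f) := p2
  (a*d + 5*b*e, a*e + b*d, c*f)

-- A's recursion, on the nonnegative exponent (n ≥ 0, guaranteed by Pre_; Python A
-- recurses forever on n < 0, which Pre_ excludes). n//2 for n ≥ 0 is m/2 on Nat.
def phi_pow_rec (base : Int × Int × Int) (m : Nat) : Int × Int × Int :=
  if m = 0 then (1, 0, 1)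
  else
    let val := phi_pow_rec (mult base base) (m / 2)
    if m % 2 = 1 then mult base val else val
decreasing_by exact Nat.div_lt_self (Nat.pos_of_ne_zero (by assumption)) (by norm_num)

def phi_pow (base : Int × Int × Int) (n : Int) : Int × Int × Int :=
  phi_pow_rec base n.toNat

-- ===== PORT B =====
-- format(n,'b') for n ≥ 0: the list of binary digits, most significant first
-- ('0' alone for n = 0); digits as Bools (true = '1').
def binDigits (m : Nat) : List Bool :=
  if m = 0 then [] else binDigits (m / 2) ++ [decide (m % 2 = 1)]
decreasing_by exact Nat.div_lt_self (Nat.pos_of_ne_zero (by assumption)) (by norm_num)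

-- one iteration of B's for-loop body
def phiStep (base result : Int × Int × Int) (ch : Bool) : Int × Int × Int :=
  let result := mult result result
  if ch then mult result base else result

def phi_pow_alt (base : Int × Int × Int) (n : Int) : Int × Int × Int :=
  let digits := if n.toNat = 0 then [false] else binDigits n.toNat
  digits.foldl (phiStep base) (1, 0, 1)

-- ===== PRECONDITION & SPEC =====
-- Pre_ excludes n < 0, on which Python A recurses forever (RecursionError).
def Pre_phi_pow (base : Int × Int × Int) (n : Int) : Prop := 0 ≤ n
instance (base : Int × Int × Int) (n : Int) : Decidable (Pre_phi_pow base n) := by unfold Pre_phi_pow; infer_instance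
def pvWitness_phi_pow : (Int × Int × Int) × Int := ((1, 1, 2), 10)

def Spec_phi_pow (base : Int × Int × Int) (n : Int) (out : Int × Int × Int) : Prop := out = phi_pow_alt base n
instance (base : Int × Int × Int) (n : Int) (out : Int × Int × Int) : Decidable (Spec_phi_pow base n out) := by unfold Spec_phi_pow; infer_instance

-- ===== CLAIM (what is proved, stated in full; the proofs are below) =====
def Claim_equal_phi_pow : Prop := ∀ (base : Int × Int × Int) (n : Int), Dom_phi_pow base n → Pre_phi_pow base n → Spec_phi_pow base n (phi_pow base n)

-- ===== LEMMAS AND PROOFS =====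
-- reference power: base^k in the phi-struct monoid
def pexp (base : Int × Int × Int) : Nat → Int × Int × Int
  | 0 => (1, 0, 1)
  | k + 1 => mult base (pexp base k)

theorem mult_comm' (p q : Int × Int × Int) : mult p q = mult q p := by
  obtain ⟨a, b, c⟩ := p; obtain ⟨d, e, f⟩ := q
  simp [mult]; refine ⟨by ring, by ring, by ring⟩

theorem mult_assoc' (p q r : Int × Int × Int) : mult (mult p q) r = mult p (mult q r) := by
  obtain ⟨a, b, c⟩ := p; obtain ⟨d, e, f⟩ := q; obtain ⟨g, h, i⟩ := r
  simp [mult]; refine ⟨by ring, by ring, by ring⟩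

theorem mult_one (p : Int × Int × Int) : mult (1, 0, 1) p = p := by
  obtain ⟨a, b, c⟩ := p; simp [mult]

theorem pexp_add (base : Int × Int × Int) (a b : Nat) :
    mult (pexp base a) (pexp base b) = pexp base (a + b) := by
  induction a with
  | zero => simp [pexp, mult_one]
  | succ a ih =>
      have : a + 1 + b = (a + b) + 1 := by omega
      rw [this, pexp, pexp, mult_assoc', ih]

theorem pexp_sq (base : Int × Int × Int) (j : Nat) :
    pexp (mult base base) j = pexp base (2 * j) := by
  induction j with
  | zero => rfl
  | succ j ih =>
      have : 2 * (j + 1) = (2 * j) + 1 + 1 := by omega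
      rw [this, pexp, ih, pexp, pexp, ← mult_assoc']

-- A computes base^m
theorem rec_eq_pexp (m : Nat) : ∀ base, phi_pow_rec base m = pexp base m := by
  induction m using Nat.strong_induction_on with
  | _ m ih =>
    intro base
    by_cases h : m = 0
    · subst h; rw [phi_pow_rec]; rfl
    · rw [phi_pow_rec]
      simp only [h, if_false]
      rw [ih (m / 2) (Nat.div_lt_self (Nat.pos_of_ne_zero h) (by norm_num)), pexp_sq]
      by_cases hm : m % 2 = 1
      · simp only [hm, if_true]
        have h2 : m = 2 * (m / 2) + 1 := by omega
        rw [← pexp]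
        congr 1
        omega
      · simp only [hm, if_false]
        congr 1
        omega

-- one loop step turns base^j into base^(2j + digit)
theorem phiStep_pexp (base : Int × Int × Int) (j : Nat) (b : Bool) :
    phiStep base (pexp base j) b = pexp base (2 * j + if b then 1 else 0) := by
  cases b with
  | false =>
      simp only [phiStep, if_false, Bool.false_eq_true]
      rw [pexp_add]
      congr 1
      omega
  | true =>
      simp only [phiStep, if_true]
      rw [pexp_add, mult_comm', ← pexp]
      congr 1
      omega

-- loop invariant for the MSB-first fold: finishing the digits of m from base^k
-- yields base^(k·2^len + m)
theorem fold_digits (m : Nat) : ∀ (k : Nat) (base : Int × Int × Int),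
    (binDigits m).foldl (phiStep base) (pexp base k)
      = pexp base (k * 2 ^ (binDigits m).length + m) := by
  induction m using Nat.strong_induction_on with
  | _ m ih =>
    intro k base
    by_cases h : m = 0
    · subst h; rw [binDigits]; simp
    · rw [binDigits]
      simp only [h, if_false, List.foldl_append, List.foldl_cons, List.foldl_nil,
        List.length_append, List.length_cons, List.length_nil]
      rw [ih (m / 2) (Nat.div_lt_self (Nat.pos_of_ne_zero h) (by norm_num)) k base]
      rw [phiStep_pexp]
      congr 1
      have hpow : 2 ^ ((binDigits (m / 2)).length + (0 + 1))
          = 2 * 2 ^ (binDigits (m / 2)).length := by ring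
      have hX : k * (2 * 2 ^ (binDigits (m / 2)).length)
          = 2 * (k * 2 ^ (binDigits (m / 2)).length) := by ring
      have hif : (if decide (m % 2 = 1) = true then 1 else 0 : Nat) = m % 2 := by
        rcases Nat.mod_two_eq_zero_or_one m with h2 | h2 <;> simp [h2]
      rw [hpow, hX, hif]
      omega

-- ===== VERDICT (by name: the statement is the Claim_ definition above) =====
theorem phi_pow_spec : Claim_equal_phi_pow := by
  intro base n _ _
  unfold Spec_phi_pow phi_pow phi_pow_alt
  by_cases h : n.toNat = 0
  · simp only [h, if_true]
    rw [rec_eq_pexp]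
    simp [phiStep, mult, pexp]
  · simp only [h, if_false]
    have h0 := fold_digits n.toNat 0 base
    simp only [pexp, Nat.zero_mul, Nat.zero_add] at h0
    rw [rec_eq_pexp, ← h0]
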